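-- pv_equiv track=rewrite | github.com/ab14jain/GrowTogether | Assignment Code/GoodPair.py | solve
-- ===== SOURCE A (Python) =====
-- def solve(A, B):
--     dictA = {i: 0 for i in A}
--     for i in A:
--         dictA[i] += 1
--
--     for i in A:
--         dictA[i] -= 1
--         diff = abs(i - B)
--         if diff in dictA and dictA[diff] > 0:
--             return 1
--
--     return 0
-- ===== SOURCE B (Python) =====
-- def solve(A, B):
--     n = len(A)
--     for k in range(n):
--         t = abs(A[k] - B)
--         for m in range(k + 1, n):
--             if A[m] == t:
--                 return 1
--     return 0
-- ===== Notes on version B (the rewrite author's own statement) =====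
-- stated objective: simpler
-- what changed: Replaced the counting dict (build counts, then decrement-and-probe) with a direct nested scan over index pairs k<m checking A[m] == abs(A[k]-B); no dictionary or counts are maintained.
import Mathlib
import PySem

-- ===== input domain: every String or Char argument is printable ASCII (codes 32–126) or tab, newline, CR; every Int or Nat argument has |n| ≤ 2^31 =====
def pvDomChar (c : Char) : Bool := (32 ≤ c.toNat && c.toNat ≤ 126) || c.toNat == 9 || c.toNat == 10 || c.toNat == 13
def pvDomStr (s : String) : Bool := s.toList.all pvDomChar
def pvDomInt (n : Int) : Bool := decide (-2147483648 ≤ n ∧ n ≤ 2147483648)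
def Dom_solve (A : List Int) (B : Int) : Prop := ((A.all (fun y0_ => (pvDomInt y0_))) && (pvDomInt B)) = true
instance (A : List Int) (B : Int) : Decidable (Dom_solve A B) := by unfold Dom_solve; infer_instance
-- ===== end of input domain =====

-- B replaces A's counting dict with a direct nested scan over index pairs k<m (simpler, no dict).


-- ===== PORT A =====
-- 'for i in A: dictA[i] -= 1; diff = abs(i-B); if diff in dictA and dictA[diff] > 0: return 1' / 'return 0'
def solveLoop (B : Int) : List Int → PySem.Dict Int Int → Int
  | [], _ => 0
  | i :: rest, d =>
    let d' := d.modify i 0 (· - 1)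
    let diff := |i - B|
    if d'.contains diff && decide (d'.getD diff 0 > 0) then 1
    else solveLoop B rest d'

def solve (A : List Int) (B : Int) : Int :=
  -- dictA = {i: 0 for i in A}
  let d0 := A.foldl (fun d i => d.insert i (0 : Int)) PySem.Dict.empty
  -- for i in A: dictA[i] += 1
  let d1 := A.foldl (fun d i => d.modify i 0 (· + 1)) d0
  solveLoop B A d1

-- ===== PORT B =====
-- inner loop 'for m in range(k+1, n): if A[m] == t: return 1'
def hasLater (t : Int) : List Int → Bool
  | [] => false
  | x :: xs => if x = t then true else hasLater t xs

-- outer loop 'for k in range(n): t = abs(A[k]-B); …' / 'return 0'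
def solveAltLoop (B : Int) : List Int → Int
  | [] => 0
  | x :: xs => if hasLater (|x - B|) xs then 1 else solveAltLoop B xs

def solve_alt (A : List Int) (B : Int) : Int := solveAltLoop B A

-- ===== PRECONDITION & SPEC =====
def Spec_solve (A : List Int) (B : Int) (out : Int) : Prop := out = solve_alt A B
instance (A : List Int) (B : Int) (out : Int) : Decidable (Spec_solve A B out) := by unfold Spec_solve; infer_instance

-- ===== CLAIM (what is proved, stated in full; the proofs are below) =====
def Claim_equal_solve : Prop := ∀ (A : List Int) (B : Int), Dom_solve A B → Spec_solve A B (solve A B)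

-- ===== LEMMAS AND PROOFS =====

theorem hasLater_iff (t : Int) (xs : List Int) : hasLater t xs = true ↔ t ∈ xs := by
  induction xs with
  | nil => simp [hasLater]
  | cons x xs ih =>
    by_cases h : x = t
    · subst h; simp [hasLater]
    · have h' : t ≠ x := fun e => h e.symm
      simp [hasLater, h, h', ih]

-- the zero-initialising comprehension: lookup is `some 0` on members, untouched elsewhere
theorem get?_init (l : List Int) (d : PySem.Dict Int Int) (v : Int) :
    ((l.foldl (fun d i => d.insert i (0 : Int)) d).get? v)
      = if v ∈ l then some 0 else d.get? v := by
  induction l generalizing d with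
  | nil => simp
  | cons i l ih =>
    simp only [List.foldl_cons, ih, PySem.Dict.get?_insert, List.mem_cons]
    by_cases hv : v ∈ l <;> by_cases hi : v = i <;> simp [hv, hi]

-- contains is preserved by a modify loop (keys never change)
theorem contains_modify_fold (l : List Int) (d : PySem.Dict Int Int) (v : Int)
    (h : ∀ i ∈ l, d.contains i = true) :
    ((l.foldl (fun d i => d.modify i 0 (· + 1)) d).contains v) = d.contains v := by
  induction l generalizing d with
  | nil => simp
  | cons i l ih =>
    simp only [List.foldl_cons]
    rw [ih]
    · rw [PySem.Dict.contains_modify]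
      rcases eq_or_ne v i with rfl | hne
      · simp [h v (by simp)]
      · simp [hne]
    · intro j hj
      rw [PySem.Dict.contains_modify]
      simp [h j (List.mem_cons_of_mem _ hj)]

-- the main loop invariant: with counts of the remaining suffix in the dict,
-- A's loop computes exactly B's nested scan
theorem loop_eq (B : Int) (full : List Int) :
    ∀ (r : List Int) (d : PySem.Dict Int Int),
    (∀ v, d.contains v = decide (v ∈ full)) →
    (∀ v, d.getD v 0 = (r.count v : Int)) →
    (∀ v ∈ r, v ∈ full) →
    solveLoop B r d = solveAltLoop B r := by
  intro r
  induction r with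
  | nil => intro d _ _ _; rfl
  | cons i rest ih =>
    intro d hC hG hsub
    have hC' : ∀ v, (d.modify i 0 (· - 1)).contains v = decide (v ∈ full) := by
      intro v
      rw [PySem.Dict.contains_modify]
      rcases eq_or_ne v i with rfl | hne
      · simp [hC v, hsub v (by simp)]
      · simp [hne, hC v]
    have hG' : ∀ v, (d.modify i 0 (· - 1)).getD v 0 = (rest.count v : Int) := by
      intro v
      rw [PySem.Dict.getD_modify]
      rcases eq_or_ne v i with rfl | hne
      · rw [if_pos rfl, hG v]
        simp only [List.count_cons_self]
        push_cast
        ring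
      · rw [if_neg hne, hG v]
        have h2 : ¬ i = v := fun e => hne e.symm
        simp [h2]
    have hcond : ((d.modify i 0 (· - 1)).contains (|i - B|)
          && decide ((d.modify i 0 (· - 1)).getD (|i - B|) 0 > 0))
        = hasLater (|i - B|) rest := by
      rw [hC' (|i - B|), hG' (|i - B|)]
      by_cases hmem : (|i - B|) ∈ rest
      · have ht : hasLater (|i - B|) rest = true := (hasLater_iff _ _).mpr hmem
        have hcnt : 0 < rest.count (|i - B|) := List.count_pos_iff.mpr hmem
        rw [ht]
        simp only [Bool.and_eq_true, decide_eq_true_eq]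
        refine ⟨by simp [hsub _ (List.mem_cons_of_mem _ hmem)], ?_⟩
        exact_mod_cast hcnt
      · have hf : hasLater (|i - B|) rest = false := by
          rw [← Bool.not_eq_true, hasLater_iff]
          exact hmem
        rw [hf]
        simp [List.count_eq_zero_of_not_mem hmem]
    show (if _ then (1:Int) else solveLoop B rest (d.modify i 0 (· - 1))) = _
    rw [hcond, ih (d.modify i 0 (· - 1)) hC' hG'
          (fun v hv => hsub v (List.mem_cons_of_mem _ hv))]
    rfl

-- ===== VERDICT (by name: the statement is the Claim_ definition above) =====
theorem solve_spec : Claim_equal_solve := by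
  intro A B _
  unfold Spec_solve solve solve_alt
  have hd0get : ∀ v, (A.foldl (fun d i => d.insert i (0 : Int)) PySem.Dict.empty).get? v
      = if v ∈ A then some 0 else none := by
    intro v; rw [get?_init]; simp
  have hd0C : ∀ v, (A.foldl (fun d i => d.insert i (0 : Int)) PySem.Dict.empty).contains v
      = decide (v ∈ A) := by
    intro v
    rw [PySem.Dict.contains_eq_isSome_get?, hd0get v]
    by_cases hv : v ∈ A <;> simp [hv]
  have hd0D : ∀ v, (A.foldl (fun d i => d.insert i (0 : Int)) PySem.Dict.empty).getD v 0 = 0 := by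
    intro v
    rw [PySem.Dict.getD_eq_get?_getD, hd0get v]
    by_cases hv : v ∈ A <;> simp [hv]
  apply loop_eq
  · intro v
    rw [contains_modify_fold _ _ _ (fun i hi => by rw [hd0C i]; simp [hi])]
    exact hd0C v
  · intro v
    rw [PySem.Dict.getD_foldl_modify_add_one, hd0D v]
    simp
  · intro v hv; exact hv
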